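-- pv_equiv track=rewrite | github.com/VictorGerin/Logisim_CPU | scripts/run_pipeline.py | parse_pla_headers
-- ===== SOURCE A (Python) =====
-- def parse_pla_headers(lines: list[str]) -> tuple[list[str], list[str], list[str]]:
--     """Parse an Espresso PLA file with headers.
--
--     Extracts input_labels from '.ilb' and output_labels from '.ob'.
--     Returns (input_labels, output_labels, data_lines) where data_lines
--     contains only the product-term rows (no header directives).
--     """
--     input_labels: list[str] = []
--     output_labels: list[str] = []
--     data_lines: list[str] = []
--     for line in lines:
--         s = line.strip()
--         if s.startswith(".ilb "):
--             input_labels = s[5:].split()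
--         elif s.startswith(".ob "):
--             output_labels = s[4:].split()
--         elif s and not s.startswith("."):
--             data_lines.append(s)
--     return input_labels, output_labels, data_lines
-- ===== SOURCE B (Python) =====
-- def _last_match(stripped, prefix):
--     """Tail of the last stripped line starting with prefix, split; [] if none."""
--     for s in reversed(stripped):
--         if s.startswith(prefix):
--             return s[len(prefix):].split()
--     return []
--
--
-- def parse_pla_headers(lines: list[str]) -> tuple[list[str], list[str], list[str]]:
--     stripped = [l.strip() for l in lines]
--     input_labels = _last_match(stripped, ".ilb ")
--     output_labels = _last_match(stripped, ".ob ")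
--     data_lines = [s for s in stripped if s and not s.startswith(".")]
--     return input_labels, output_labels, data_lines
-- ===== Notes on version B (the rewrite author's own statement) =====
-- stated objective: alternative
-- what changed: Replaced the single forward loop with three accumulators and an elif chain by three independent passes over a once-stripped list: each header is found by a backward scan returning on the first (i.e. last) match, and data lines come from a separate filter pass.
import Mathlib
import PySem

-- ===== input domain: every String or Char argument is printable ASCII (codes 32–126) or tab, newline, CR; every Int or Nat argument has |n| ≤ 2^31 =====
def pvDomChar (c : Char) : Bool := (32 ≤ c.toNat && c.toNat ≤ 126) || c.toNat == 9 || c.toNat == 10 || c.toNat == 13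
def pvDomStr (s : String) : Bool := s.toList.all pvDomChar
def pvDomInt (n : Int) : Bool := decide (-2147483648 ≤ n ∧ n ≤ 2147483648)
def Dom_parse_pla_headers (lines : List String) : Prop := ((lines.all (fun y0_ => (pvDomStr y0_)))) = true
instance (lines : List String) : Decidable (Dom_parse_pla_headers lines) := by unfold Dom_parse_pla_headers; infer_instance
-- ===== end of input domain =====

-- B replaces A's single three-accumulator loop by three independent passes (backward
-- scan per header, separate filter for data lines); alternative decomposition, same cost.


-- ===== PORT A =====
def parse_pla_headers (lines : List String) : List String × List String × List String :=
  let st := lines.foldl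
    (fun (acc : List String × List String × List String) line =>
      let (input_labels, output_labels, data_lines) := acc
      let s := PySem.Str.strip line
      if PySem.Str.startswith s ".ilb " then
        (PySem.Str.split₀ (PySem.Str.slice s (some 5) none), output_labels, data_lines)
      else if PySem.Str.startswith s ".ob " then
        (input_labels, PySem.Str.split₀ (PySem.Str.slice s (some 4) none), data_lines)
      else if (!(s == "")) && !PySem.Str.startswith s "." then
        (input_labels, output_labels, data_lines ++ [s])
      else
        (input_labels, output_labels, data_lines))
    ([], [], [])
  st

-- ===== PORT B =====
-- helper of Source B: scan the reversed stripped lines, return on the first (= last) match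
def pvLastMatch (pre : String) : List String → List String
  | [] => []
  | s :: rest =>
    if PySem.Str.startswith s pre then
      PySem.Str.split₀ (PySem.Str.slice s (some (PySem.Str.len pre)) none)
    else pvLastMatch pre rest

def parse_pla_headers_alt (lines : List String) : List String × List String × List String :=
  let stripped := lines.map PySem.Str.strip
  let input_labels := pvLastMatch ".ilb " stripped.reverse
  let output_labels := pvLastMatch ".ob " stripped.reverse
  let data_lines := stripped.filter (fun s => (!(s == "")) && !PySem.Str.startswith s ".")
  (input_labels, output_labels, data_lines)

-- ===== PRECONDITION & SPEC =====
def Spec_parse_pla_headers (lines : List String) (out : List String × List String × List String) : Prop := out = parse_pla_headers_alt lines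
instance (lines : List String) (out : List String × List String × List String) : Decidable (Spec_parse_pla_headers lines out) := by unfold Spec_parse_pla_headers; infer_instance

-- ===== CLAIM (what is proved, stated in full; the proofs are below) =====
def Claim_equal_parse_pla_headers : Prop := ∀ (lines : List String), Dom_parse_pla_headers lines → Spec_parse_pla_headers lines (parse_pla_headers lines)

-- ===== LEMMAS AND PROOFS =====

-- pvLastMatch with an explicit default, to state the fold invariant
def pvLtD (pre : String) (d : List String) : List String → List String
  | [] => d
  | s :: rest =>
    if PySem.Str.startswith s pre then
      PySem.Str.split₀ (PySem.Str.slice s (some (PySem.Str.len pre)) none)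
    else pvLtD pre d rest

theorem pvLastMatch_eq_ltD (pre : String) (l : List String) :
    pvLastMatch pre l = pvLtD pre [] l := by
  induction l with
  | nil => rfl
  | cons s rest ih => simp [pvLastMatch, pvLtD, ih]

theorem pvLtD_append (pre : String) (d : List String) (l : List String) (s : String) :
    pvLtD pre d (l ++ [s]) =
      pvLtD pre (if PySem.Str.startswith s pre then
          PySem.Str.split₀ (PySem.Str.slice s (some (PySem.Str.len pre)) none)
        else d) l := by
  induction l with
  | nil => simp [pvLtD]
  | cons t rest ih => simp [pvLtD, ih]

theorem pv_not_both (s : String) (h : PySem.Str.startswith s ".ilb " = true) :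
    PySem.Str.startswith s ".ob " = false := by
  by_contra hc
  rw [Bool.not_eq_false] at hc
  simp only [PySem.Str.startswith, PySem.Chars.startswith_iff] at h hc
  have := List.prefix_of_prefix_length_le hc h (by decide)
  revert this; decide

theorem pv_dot_of_ilb (s : String) (h : PySem.Str.startswith s ".ilb " = true) :
    PySem.Str.startswith s "." = true := by
  simp only [PySem.Str.startswith, PySem.Chars.startswith_iff] at h ⊢
  exact List.IsPrefix.trans (by decide) h

theorem pv_dot_of_ob (s : String) (h : PySem.Str.startswith s ".ob " = true) :
    PySem.Str.startswith s "." = true := by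
  simp only [PySem.Str.startswith, PySem.Chars.startswith_iff] at h ⊢
  exact List.IsPrefix.trans (by decide) h

theorem pv_len_ilb : PySem.Str.len ".ilb " = 5 := by decide

theorem pv_len_ob : PySem.Str.len ".ob " = 4 := by decide

theorem pv_fold_inv (lines : List String) : ∀ (il ol dl : List String),
    lines.foldl
      (fun (acc : List String × List String × List String) line =>
        let (input_labels, output_labels, data_lines) := acc
        let s := PySem.Str.strip line
        if PySem.Str.startswith s ".ilb " then
          (PySem.Str.split₀ (PySem.Str.slice s (some 5) none), output_labels, data_lines)
        else if PySem.Str.startswith s ".ob " then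
          (input_labels, PySem.Str.split₀ (PySem.Str.slice s (some 4) none), data_lines)
        else if (!(s == "")) && !PySem.Str.startswith s "." then
          (input_labels, output_labels, data_lines ++ [s])
        else
          (input_labels, output_labels, data_lines))
      (il, ol, dl)
    = (pvLtD ".ilb " il (lines.map PySem.Str.strip).reverse,
       pvLtD ".ob " ol (lines.map PySem.Str.strip).reverse,
       dl ++ (lines.map PySem.Str.strip).filter
         (fun s => (!(s == "")) && !PySem.Str.startswith s ".")) := by
  induction lines with
  | nil => intro il ol dl; simp [pvLtD]
  | cons line rest ih =>
    intro il ol dl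
    simp only [List.foldl_cons, List.map_cons, List.reverse_cons, List.filter_cons,
      pvLtD_append, pv_len_ilb, pv_len_ob]
    by_cases h1 : PySem.Str.startswith (PySem.Str.strip line) ".ilb " = true
    · have h2 := pv_not_both _ h1
      have h3 := pv_dot_of_ilb _ h1
      simp only [h1, h2, h3]
      simpa using ih _ _ _
    · simp only [Bool.not_eq_true] at h1
      by_cases h2 : PySem.Str.startswith (PySem.Str.strip line) ".ob " = true
      · have h3 := pv_dot_of_ob _ h2
        simp only [h1, h2, h3]
        simpa using ih _ _ _
      · simp only [Bool.not_eq_true] at h2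
        by_cases h3 : ((!(PySem.Str.strip line == "")) &&
            !PySem.Str.startswith (PySem.Str.strip line) ".") = true
        · simp only [h1, h2, h3]
          simpa [List.append_assoc] using ih il ol (dl ++ [PySem.Str.strip line])
        · simp only [Bool.not_eq_true] at h3
          simp only [h1, h2, h3]
          simpa using ih _ _ _

-- ===== VERDICT (by name: the statement is the Claim_ definition above) =====
theorem parse_pla_headers_spec : Claim_equal_parse_pla_headers := by
  intro lines _
  unfold Spec_parse_pla_headers parse_pla_headers parse_pla_headers_alt
  rw [pv_fold_inv lines [] [] []]
  simp [pvLastMatch_eq_ltD]
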